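-- pv_equiv track=rewrite | github.com/BriceDecurninge/Forward-and-Backward-Algorithms-for-Propositional-Rule-Systems | python/compare/classes.py | parseParenthesis
-- ===== SOURCE A (Python) =====
-- def parseParenthesis(string, list) :
--    """recursive function that get what is inside parenthesis whitin a string, put it in a list given in paramter,
--      and return what is outside the parenthesis.
--       ex : parseParenthesis("(a1∨a2)∧(b1∨b2)", list=[]) returns ∧; list is now ['a1∨a2','b1∨b2']"""
--
--    if string == "" or string == None:
--       return
--    if "(" not in string :
--       return string
--    newString = ""
--    for caracter1 in string :
--       if caracter1 == '(' :
--          index1 = string.index(caracter1)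
--          newString = string[index1+1:]
--          #getting the string after the first parenthesis
--          for caracter2 in newString :
--             if caracter2 == ')' :
--                index2 = string.index(caracter2)
--                list.append(newString[:newString.index(caracter2)])
--                return parseParenthesis(string[:index1] + string[index2+1:], list)
--    #in case there is a problem
--    return "failed"
-- ===== SOURCE B (Python) =====
-- def parseParenthesis(string, list):
--     """Single left-to-right scan: collects each parenthesised segment into `list`
--     and returns the text outside the parentheses (None if empty, "failed" on an
--     unclosed '(')."""
--     if not string:
--         return None
--     if '(' not in string:
--         return string
--     outside = []
--     buf = None          # None = outside parentheses, list of chars = inside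
--     for ch in string:
--         if buf is None:
--             if ch == '(':
--                 buf = []
--             else:
--                 outside.append(ch)
--         elif ch == ')':
--             list.append(''.join(buf))
--             buf = None
--         else:
--             buf.append(ch)
--     if buf is not None:
--         return "failed"
--     return ''.join(outside) or None
-- ===== Notes on version B (the rewrite author's own statement) =====
-- stated objective: alternative
-- what changed: A repeatedly rescans and rebuilds the whole string (str.index + slicing + one recursion level per parenthesis group); B is one linear scan with an inside/outside state that appends each segment and accumulates the outside string. Pre_ excludes strings whose parenthesis pattern has a ')' both before and after the first '(' (after stripping matched groups): on those A recurses forever on a non-shrinking string and never returns.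
import Mathlib
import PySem

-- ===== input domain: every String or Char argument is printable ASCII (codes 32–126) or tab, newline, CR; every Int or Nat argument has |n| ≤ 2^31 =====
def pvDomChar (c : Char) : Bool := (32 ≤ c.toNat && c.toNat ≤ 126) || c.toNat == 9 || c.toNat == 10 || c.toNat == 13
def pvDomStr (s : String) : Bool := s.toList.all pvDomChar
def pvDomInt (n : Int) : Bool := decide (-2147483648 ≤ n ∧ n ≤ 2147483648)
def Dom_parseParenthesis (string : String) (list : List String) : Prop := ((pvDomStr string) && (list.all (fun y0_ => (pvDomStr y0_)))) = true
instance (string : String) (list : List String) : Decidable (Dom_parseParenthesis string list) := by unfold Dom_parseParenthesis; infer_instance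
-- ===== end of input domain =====

-- B replaces A's rescan-and-rebuild recursion by one linear scan; equivalence is about the
-- RETURN value only (both Pythons also append the same segments to `list`, in the same order).

-- ===== PORT A =====
-- A's recursion works on strings rebuilt by slicing; the port represents the current string as
-- its character list (rebuilt with String.ofList at a `return string`), which is exact for these
-- operations.  A can recurse forever (see Pre_ below); the port carries a fuel guard that only
-- makes the same computation total — on every input admitted by Pre_ the fuel is never exhausted.
mutual
  -- one call of parseParenthesis (fuel counts recursion depth)
  def parseParenthesisAux (fuel : Nat) (cs : List Char) (l : List String) : Option String :=
    match fuel with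
    | 0 => none  -- fuel exhausted (A diverges; unreachable under Pre_)
    | fuel' + 1 =>
      if cs = [] then none                                    -- if string == "": return
      else if ¬ cs.contains '(' then some (String.ofList cs)  -- if "(" not in string: return string
      else pvAouter fuel' cs l cs                             -- for caracter1 in string: …
  termination_by (fuel, 0, 0)
  decreasing_by all_goals (simp_wf; simp [Prod.lex_def])
  -- the outer `for caracter1 in string` loop (last argument = remaining characters)
  def pvAouter (fuel : Nat) (cs : List Char) (l : List String) : List Char → Option String
    | [] => some "failed"                                     -- loop fell through: return "failed"
    | c1 :: rem =>
      if c1 = '(' then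
        let index1 := (PySem.List.index? cs c1).getD 0        -- string.index(caracter1) ('(' is present)
        let ns := cs.drop (index1 + 1)                        -- newString = string[index1+1:]
        match pvAinner fuel cs ns l index1 ns with
        | some r => r                                         -- inner loop returned
        | none => pvAouter fuel cs l rem
      else pvAouter fuel cs l rem
  termination_by rem => (fuel, 2, rem.length)
  decreasing_by all_goals (simp_wf; simp [Prod.lex_def])
  -- the inner `for caracter2 in newString` loop (last argument = remaining characters)
  def pvAinner (fuel : Nat) (cs ns : List Char) (l : List String) (index1 : Nat) :
      List Char → Option (Option String)
    | [] => none                                              -- inner loop fell through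
    | c2 :: rem =>
      if c2 = ')' then
        let index2 := (PySem.List.index? cs c2).getD 0        -- string.index(caracter2)
        let seg := ns.take ((PySem.List.index? ns c2).getD 0) -- newString[:newString.index(caracter2)]
        some (parseParenthesisAux fuel
                (cs.take index1 ++ cs.drop (index2 + 1))      -- string[:index1] + string[index2+1:]
                (l ++ [String.ofList seg]))                   -- list.append(…)
      else pvAinner fuel cs ns l index1 rem
  termination_by rem => (fuel, 1, rem.length)
  decreasing_by all_goals (simp_wf; simp [Prod.lex_def])
end

def parseParenthesis (string : String) (list : List String) : Option String :=
  -- fuel: each recursion level of A removes at least two characters of the admitted string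
  parseParenthesisAux (string.toList.length + 1) string.toList list

-- ===== PORT B =====
-- one scan step of Source B: state = (outside chars, current '('-buffer or none, collected list)
def pvBstep (st : List Char × Option (List Char) × List String) (ch : Char) :
    List Char × Option (List Char) × List String :=
  match st with
  | (outside, none, lst) =>
    if ch = '(' then (outside, some [], lst) else (outside ++ [ch], none, lst)
  | (outside, some buf, lst) =>
    if ch = ')' then (outside, none, lst ++ [String.ofList buf])
    else (outside, some (buf ++ [ch]), lst)

def parseParenthesis_alt (string : String) (list : List String) : Option String :=
  if string = "" then none
  else if ¬ string.toList.contains '(' then some string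
  else
    match string.toList.foldl pvBstep ([], none, list) with
    | (_, some _, _) => some "failed"                         -- unclosed '('
    | (outside, none, _) => if outside = [] then none else some (String.ofList outside)

-- ===== PRECONDITION & SPEC =====
-- Pre_ excludes exactly the strings whose parenthesis pattern has a ')' both before and after the
-- first '(' once matched '('+…')' groups are stripped: on those A recurses forever on a string
-- that never shrinks (RecursionError / divergence).  Accepted pattern: ('('+ ')')* ')'* '('*,
-- checked by a four-state automaton over the input's characters.
def pvGood : Nat → List Char → Bool
  | _, [] => true
  | st, c :: r =>
    if c = '(' then
      if st = 0 ∨ st = 1 then pvGood 1 r else pvGood 3 r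
    else if c = ')' then
      if st = 1 then pvGood 0 r
      else if st = 0 ∨ st = 2 then pvGood 2 r
      else false
    else pvGood st r

def Pre_parseParenthesis (string : String) (list : List String) : Prop :=
  pvGood 0 string.toList = true
instance (string : String) (list : List String) : Decidable (Pre_parseParenthesis string list) := by
  unfold Pre_parseParenthesis; infer_instance

def pvWitness_parseParenthesis : String × List String := ("(a1)b((c2)d", [])

def Spec_parseParenthesis (string : String) (list : List String) (out : Option String) : Prop :=
  out = parseParenthesis_alt string list
instance (string : String) (list : List String) (out : Option String) :
    Decidable (Spec_parseParenthesis string list out) := by unfold Spec_parseParenthesis; infer_instance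

-- ===== CLAIM (what is proved, stated in full; the proofs are below) =====
def Claim_equal_parseParenthesis : Prop :=
  ∀ (string : String) (list : List String), Dom_parseParenthesis string list →
    Pre_parseParenthesis string list →
    Spec_parseParenthesis string list (parseParenthesis string list)

-- ===== LEMMAS AND PROOFS =====

-- B's scan assembled over a character list (proof-side restatement of parseParenthesis_alt)
def altCore (cs : List Char) (l : List String) : Option String :=
  if cs = [] then none
  else if ¬ cs.contains '(' then some (String.ofList cs)
  else
    match cs.foldl pvBstep ([], none, l) with
    | (_, some _, _) => some "failed"
    | (out, none, _) => if out = [] then none else some (String.ofList out)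

-- ---- DFA (pvGood) lemmas ----
theorem g_skip (a : List Char) (h : ∀ c ∈ a, c ≠ '(' ∧ c ≠ ')') :
    ∀ (st : Nat) (t : List Char), pvGood st (a ++ t) = pvGood st t := by
  induction a with
  | nil => intro st t; rfl
  | cons c a ih =>
    intro st t
    have hc := h c (by simp)
    simp only [List.cons_append, pvGood, if_neg hc.1, if_neg hc.2]
    exact ih (fun c hc => h c (by simp [hc])) st t

theorem g_skip2 (a : List Char) (h : '(' ∉ a) :
    ∀ t : List Char, pvGood 2 (a ++ t) = pvGood 2 t := by
  induction a with
  | nil => intro t; rfl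
  | cons c a ih =>
    intro t
    have hc : c ≠ '(' := fun hce => h (by simp [hce])
    have ih' := ih (fun hm => h (by simp [hm])) t
    by_cases hc2 : c = ')' <;>
      simpa [pvGood, hc, hc2] using ih' 

theorem g_state3_false (t : List Char) (h : ')' ∈ t) : pvGood 3 t = false := by
  induction t with
  | nil => simp at h
  | cons c t ih =>
    by_cases hc2 : c = ')'
    · simp [pvGood, hc2]
    · have ht : ')' ∈ t := by
        rcases List.mem_cons.mp h with h1 | h1
        · exact absurd h1.symm hc2
        · exact h1
      by_cases hc : c = '(' <;> simpa [pvGood, hc, hc2] using ih ht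

theorem g_noopen2 (a : List Char) (hno : '(' ∉ a) (hcl : ')' ∈ a) :
    ∀ t : List Char, pvGood 0 (a ++ t) = pvGood 2 t := by
  induction a with
  | nil => simp at hcl
  | cons c a ih =>
    intro t
    have hc : c ≠ '(' := fun hce => hno (by simp [hce])
    by_cases hc2 : c = ')'
    · simpa [pvGood, hc, hc2] using g_skip2 a (fun hm => hno (by simp [hm])) t
    · have hcl' : ')' ∈ a := by
        rcases List.mem_cons.mp hcl with h1 | h1
        · exact absurd h1.symm hc2
        · exact h1
      simpa [pvGood, hc, hc2] using ih (fun hm => hno (by simp [hm])) hcl' t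

theorem g_state1 (m : List Char) (h : ')' ∉ m) :
    ∀ t : List Char, pvGood 1 (m ++ t) = pvGood 1 t := by
  induction m with
  | nil => intro t; rfl
  | cons c m ih =>
    intro t
    have hc2 : c ≠ ')' := fun hce => h (by simp [hce])
    have ih' := ih (fun hm => h (by simp [hm])) t
    by_cases hc : c = '(' <;> simpa [pvGood, hc, hc2] using ih' 

-- ---- A-side loop lemmas ----
theorem inner_none (fuel : Nat) (cs ns : List Char) (l : List String) (i : Nat)
    (w : List Char) (h : ')' ∉ w) : pvAinner fuel cs ns l i w = none := by
  induction w with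
  | nil => simp [pvAinner]
  | cons c w ih =>
    have hc : c ≠ ')' := fun hce => h (by simp [hce])
    simp only [pvAinner, if_neg hc]
    exact ih (fun hm => h (by simp [hm]))

theorem inner_skip (fuel : Nat) (cs ns : List Char) (l : List String) (i : Nat)
    (m w : List Char) (h : ')' ∉ m) :
    pvAinner fuel cs ns l i (m ++ w) = pvAinner fuel cs ns l i w := by
  induction m with
  | nil => simp
  | cons c m ih =>
    have hc : c ≠ ')' := fun hce => h (by simp [hce])
    simp only [List.cons_append, pvAinner, if_neg hc]
    exact ih (fun hm => h (by simp [hm]))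

theorem outer_skip (fuel : Nat) (cs : List Char) (l : List String)
    (p rem : List Char) (h : '(' ∉ p) :
    pvAouter fuel cs l (p ++ rem) = pvAouter fuel cs l rem := by
  induction p with
  | nil => simp
  | cons c p ih =>
    have hc : c ≠ '(' := fun hce => h (by simp [hce])
    simp only [List.cons_append, pvAouter, if_neg hc]
    exact ih (fun hm => h (by simp [hm]))

theorem outer_failed (fuel : Nat) (cs : List Char) (l : List String)
    (h : ')' ∉ cs.drop ((PySem.List.index? cs '(').getD 0 + 1)) :
    ∀ rem : List Char, pvAouter fuel cs l rem = some "failed" := by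
  intro rem
  induction rem with
  | nil => simp [pvAouter]
  | cons c rem ih =>
    by_cases hc : c = '('
    · subst hc
      simp only [pvAouter, if_pos rfl]
      rw [inner_none _ _ _ _ _ _ h]
      exact ih
    · simp only [pvAouter, if_neg hc]
      exact ih

-- ---- B-side fold lemmas ----
theorem fold_outside (a : List Char) (h : '(' ∉ a) :
    ∀ (t o : List Char) (l : List String),
      (a ++ t).foldl pvBstep (o, none, l) = t.foldl pvBstep (o ++ a, none, l) := by
  induction a with
  | nil => intro t o l; simp
  | cons c a ih =>
    intro t o l
    have hc : c ≠ '(' := fun hce => h (by simp [hce])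
    simp only [List.cons_append, List.foldl_cons, pvBstep, if_neg hc]
    rw [ih (fun hm => h (by simp [hm])) t (o ++ [c]) l]
    simp

theorem fold_inside (m : List Char) (h : ')' ∉ m) :
    ∀ (t o b : List Char) (l : List String),
      (m ++ t).foldl pvBstep (o, some b, l) = t.foldl pvBstep (o, some (b ++ m), l) := by
  induction m with
  | nil => intro t o b l; simp
  | cons c m ih =>
    intro t o b l
    have hc : c ≠ ')' := fun hce => h (by simp [hce])
    simp only [List.cons_append, List.foldl_cons, pvBstep, if_neg hc]
    rw [ih (fun hm => h (by simp [hm])) t o (b ++ [c]) l]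
    simp

theorem fold_inside_all (m : List Char) (h : ')' ∉ m) (o b : List Char) (l : List String) :
    m.foldl pvBstep (o, some b, l) = (o, some (b ++ m), l) := by
  have := fold_inside m h [] o b l
  simpa using this

theorem fold_no_open (r : List Char) (h : '(' ∉ r) :
    ∀ (o : List Char) (l : List String),
      r.foldl pvBstep (o, none, l) = (o ++ r, none, l) := by
  induction r with
  | nil => intro o l; simp
  | cons c r ih =>
    intro o l
    have hc : c ≠ '(' := fun hce => h (by simp [hce])
    simp only [List.foldl_cons, pvBstep, if_neg hc]
    rw [ih (fun hm => h (by simp [hm])) (o ++ [c]) l]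
    simp

-- ---- first-occurrence decomposition ----
theorem first_mem_decomp (cs : List Char) (c : Char) (h : c ∈ cs) :
    ∃ pre suf, cs = pre ++ c :: suf ∧ c ∉ pre := by
  have h1 : (PySem.List.index? cs c).isSome := (PySem.List.index?_isSome_iff cs c).mpr h
  obtain ⟨k, hk⟩ := Option.isSome_iff_exists.mp h1
  obtain ⟨pre, suf, heq, _, hnp⟩ := (PySem.List.index?_eq_some_iff cs c k).mp hk
  exact ⟨pre, suf, heq, hnp⟩

theorem index?_first (pre suf : List Char) (c : Char) (h : c ∉ pre) :
    PySem.List.index? (pre ++ c :: suf) c = some pre.length :=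
  (PySem.List.index?_eq_some_iff (pre ++ c :: suf) c pre.length).mpr ⟨pre, suf, rfl, rfl, h⟩

-- ---- the main equivalence, by induction on A's recursion depth ----
theorem main_lemma : ∀ (fuel : Nat) (cs : List Char) (l : List String),
    pvGood 0 cs = true → cs.length < 2 * fuel →
    parseParenthesisAux fuel cs l = altCore cs l := by
  intro fuel
  induction fuel with
  | zero => intro cs l _ hlen; omega
  | succ fuel ih =>
    intro cs l hg hlen
    by_cases hcs : cs = []
    · subst hcs; simp [parseParenthesisAux, altCore]
    · by_cases hop : cs.contains '('
      · have hmem : '(' ∈ cs := by simpa using hop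
        obtain ⟨a, t, hdec, hna⟩ := first_mem_decomp cs '(' hmem
        have hidx1 : PySem.List.index? cs '(' = some a.length := hdec ▸ index?_first a t '(' hna
        have hdrop1 : cs.drop (a.length + 1) = t := by
          rw [hdec, show a ++ '(' :: t = (a ++ ['(']) ++ t by simp,
            show a.length + 1 = (a ++ ['(']).length by simp]
          exact List.drop_left
        by_cases hcl : ')' ∈ t
        · -- a parenthesised segment exists: A removes it, B scans past it
          obtain ⟨m, r, hdect, hnm⟩ := first_mem_decomp t ')' hcl
          -- under pvGood, no ')' may precede the first '('
          have hna2 : ')' ∉ a := by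
            intro hina
            rw [hdec, g_noopen2 a hna hina] at hg
            have h3 : pvGood 2 ('(' :: t) = pvGood 3 t := by simp [pvGood]
            rw [h3, g_state3_false t hcl] at hg
            exact absurd hg (by simp)
          have hskipa : ∀ c ∈ a, c ≠ '(' ∧ c ≠ ')' :=
            fun c hc => ⟨fun h1 => hna (h1 ▸ hc), fun h1 => hna2 (h1 ▸ hc)⟩
          -- A-side: one level of the recursion
          have hidx2 : PySem.List.index? cs ')' = some (a.length + (m.length + 1)) := by
            have : cs = (a ++ '(' :: m) ++ ')' :: r := by simp [hdec, hdect]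
            rw [this]
            have := index?_first (a ++ '(' :: m) r ')'
              (by
                intro hx
                rcases List.mem_append.mp hx with h1 | h1
                · exact hna2 h1
                · rcases List.mem_cons.mp h1 with h2 | h2
                  · exact absurd h2 (by decide)
                  · exact hnm h2)
            simpa using this
          have hdrop2 : cs.drop (a.length + (m.length + 1) + 1) = r := by
            rw [show cs = (a ++ '(' :: m ++ [')']) ++ r by simp [hdec, hdect],
              show a.length + (m.length + 1) + 1 = (a ++ '(' :: m ++ [')']).length by simp; omega]
            exact List.drop_left
          have htake1 : cs.take a.length = a := by
            rw [hdec]; exact List.take_left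
          have hidxns : PySem.List.index? t ')' = some m.length := hdect ▸ index?_first m r ')' hnm
          have htakens : t.take m.length = m := by rw [hdect]; exact List.take_left
          have hA : parseParenthesisAux (fuel + 1) cs l
              = parseParenthesisAux fuel (a ++ r) (l ++ [String.ofList m]) := by
            simp only [parseParenthesisAux, if_neg hcs, if_neg (not_not_intro hop)]
            rw [show cs = a ++ ('(' :: t) from hdec, outer_skip fuel _ l a _ hna, ← hdec]
            simp only [pvAouter, if_pos rfl, hidx1, Option.getD_some, hdrop1]
            rw [show t = m ++ ')' :: r from hdect, inner_skip fuel _ _ _ _ m _ hnm, ← hdect]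
            simp only [pvAinner, if_pos rfl, hidx2, hidxns, Option.getD_some, htakens,
              hdrop2, htake1]
            simp
          -- goodness and length for the induction hypothesis
          have hgood' : pvGood 0 (a ++ r) = true := by
            have h1 : pvGood 0 cs = pvGood 0 r := by
              rw [hdec, g_skip a hskipa, hdect]
              simp only [pvGood, if_pos rfl, if_pos (by left; rfl : (0:Nat) = 0 ∨ (0:Nat) = 1)]
              rw [g_state1 m hnm]
              simp [pvGood]
            rw [g_skip a hskipa, ← h1, hg]
          have hlen' : (a ++ r).length < 2 * fuel := by
            have : cs.length = a.length + m.length + r.length + 2 := by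
              simp [hdec, hdect]; omega
            simp only [List.length_append]
            omega
          rw [hA, ih (a ++ r) (l ++ [String.ofList m]) hgood' hlen']
          -- B-side: altCore cs l reduces to altCore (a ++ r) (l ++ [ofList m])
          have hfold : cs.foldl pvBstep ([], none, l)
              = r.foldl pvBstep (a, none, l ++ [String.ofList m]) := by
            rw [show cs = a ++ ('(' :: (m ++ ')' :: r)) by simp [hdec, hdect],
              fold_outside a hna _ [] l]
            simp only [List.foldl_cons, pvBstep, if_pos rfl, if_true, List.nil_append]
            rw [fold_inside m hnm _ a [] _]
            simp only [List.foldl_cons, pvBstep, if_pos rfl, if_true, List.nil_append]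
          have hrhs : altCore cs l
              = (match r.foldl pvBstep (a, none, l ++ [String.ofList m]) with
                 | (_, some _, _) => some "failed"
                 | (out, none, _) => if out = [] then none else some (String.ofList out)) := by
            rw [altCore, if_neg hcs, if_neg (not_not_intro hop), hfold]
          rw [hrhs]
          by_cases har : (a ++ r).contains '('
          · -- '(' remains: both sides are the same fold over r
            have harne : a ++ r ≠ [] := by
              intro h0; rw [h0] at har; simp [List.contains_iff_mem] at har
            rw [altCore, if_neg harne, if_neg (not_not_intro har),
              fold_outside a hna r [] (l ++ [String.ofList m]), List.nil_append]
          · -- no '(' remains (so none in r): B's scan just copies the rest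
            have hnr : '(' ∉ r := by
              intro h1
              exact har (by simp only [List.contains_iff_mem, List.mem_append]; right; exact h1)
            rw [fold_no_open r hnr a (l ++ [String.ofList m])]
            by_cases har0 : a ++ r = []
            · rw [altCore, if_pos har0]
              simp [har0]
            · rw [altCore, if_neg har0, if_pos (by simpa using har)]
              simp [har0]
        · -- no ')' after the first '(': both return "failed"
          have hA : parseParenthesisAux (fuel + 1) cs l = some "failed" := by
            simp only [parseParenthesisAux, if_neg hcs, if_neg (not_not_intro hop)]
            exact outer_failed fuel cs l (by rw [hidx1]; simpa [hdrop1] using hcl) cs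
          have hB : altCore cs l = some "failed" := by
            simp only [altCore, if_neg hcs, if_neg (not_not_intro hop)]
            rw [show cs = a ++ ('(' :: t) from hdec, fold_outside a hna _ [] l]
            simp only [List.foldl_cons, pvBstep, if_pos rfl, if_true, List.nil_append]
            rw [fold_inside_all t hcl a [] l]
          rw [hA, hB]
      · have hnm : '(' ∉ cs := by simpa using hop
        simp [parseParenthesisAux, altCore, hcs, hop, hnm]

theorem alt_eq_altCore (string : String) (list : List String) :
    parseParenthesis_alt string list = altCore string.toList list := by
  by_cases h0 : string = ""
  · subst h0; rfl
  · have h1 : string.toList ≠ [] := by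
      intro h
      apply h0
      have := congrArg String.ofList h
      simpa using this
    simp [parseParenthesis_alt, altCore, h0, h1]

-- ===== VERDICT (by name: the statement is the Claim_ definition above) =====
theorem parseParenthesis_spec : Claim_equal_parseParenthesis := by
  intro string list _ hpre
  show parseParenthesis string list = parseParenthesis_alt string list
  rw [parseParenthesis, alt_eq_altCore,
    main_lemma (string.toList.length + 1) string.toList list hpre (by omega)]
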